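-- pv_equiv track=rewrite | github.com/aboutcode-org/attributecode | src/attributecode/model.py | detect_special_char
-- ===== SOURCE A (Python) =====
-- def detect_special_char(expression):
--     not_support_char = [
--         '!', '@', '#', '$', '%', '^', '&', '*', '=', '{', '}',
--         '|', '[', ']', '\\', ':', ';', '<', '>', '?', ',', '/']
--     special_character = []
--     for char in not_support_char:
--         if char in expression:
--             special_character.append(char)
--     return special_character
-- ===== SOURCE B (Python) =====
-- def detect_special_char(expression):
--     not_support_char = [
--         '!', '@', '#', '$', '%', '^', '&', '*', '=', '{', '}',
--         '|', '[', ']', '\\', ':', ';', '<', '>', '?', ',', '/']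
--     rank = {c: i for i, c in enumerate(not_support_char)}
--     seen = set()
--     for ch in expression:
--         if ch in rank:
--             seen.add(ch)
--     return sorted(seen, key=lambda c: rank[c])
-- ===== Notes on version B (the rewrite author's own statement) =====
-- stated objective: alternative
-- what changed: B makes one pass over the expression collecting the special characters it contains into a set (membership tested against a rank dict built from the fixed list), then returns that set sorted by each character's rank, instead of looping over the fixed candidate list and substring-scanning the expression for each candidate.
import Mathlib
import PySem

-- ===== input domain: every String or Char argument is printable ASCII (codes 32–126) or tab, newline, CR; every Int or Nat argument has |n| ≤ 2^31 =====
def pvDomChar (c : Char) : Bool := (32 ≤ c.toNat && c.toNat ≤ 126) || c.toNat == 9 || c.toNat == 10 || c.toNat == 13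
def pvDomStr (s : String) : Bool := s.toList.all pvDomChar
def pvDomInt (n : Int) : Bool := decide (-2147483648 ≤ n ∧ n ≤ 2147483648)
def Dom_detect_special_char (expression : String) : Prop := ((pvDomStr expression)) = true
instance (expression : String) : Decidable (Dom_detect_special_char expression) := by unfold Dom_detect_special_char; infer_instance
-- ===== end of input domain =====

-- B scans the expression once, collecting the special characters it contains into a
-- set, and returns that set sorted by each character's rank in the fixed list;
-- alternative decomposition, not claimed faster.

-- ===== PORT A =====
-- the fixed candidate list of A
def nscA : List String :=
  ["!", "@", "#", "$", "%", "^", "&", "*", "=", "{", "}",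
   "|", "[", "]", "\\", ":", ";", "<", ">", "?", ",", "/"]

def detect_special_char (expression : String) : List String :=
  nscA.foldl (fun acc c => if PySem.Str.isIn c expression then acc ++ [c] else acc) []

-- ===== PORT B =====
-- the fixed candidate list of B
def nscB : List String :=
  ["!", "@", "#", "$", "%", "^", "&", "*", "=", "{", "}",
   "|", "[", "]", "\\", ":", ";", "<", ">", "?", ",", "/"]

-- rank = {c: i for i, c in enumerate(not_support_char)}
def rankB : PySem.Dict String Int :=
  (PySem.List.enumerate nscB 0).foldl (fun d p => d.insert p.2 p.1) PySem.Dict.empty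

def detect_special_char_alt (expression : String) : List String :=
  -- for ch in expression: if ch in rank: seen.add(ch)   (iterating a string yields 1-char strings)
  let seen : PySem.Set String :=
    expression.toList.foldl
      (fun s ch =>
        if rankB.contains (String.ofList [ch]) then PySem.Set.add s (String.ofList [ch]) else s)
      PySem.Set.empty
  -- sorted(seen, key=lambda c: rank[c]); rank[c] never raises here since every element of
  -- seen is a key of rank, so getD with any default is exact; the key is injective on seen,
  -- so sorting the set is order-independent
  PySem.List.sorted seen (fun c => rankB.getD c 0) false

-- ===== PRECONDITION & SPEC =====
def Spec_detect_special_char (expression : String) (out : List String) : Prop := out = detect_special_char_alt expression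
instance (expression : String) (out : List String) : Decidable (Spec_detect_special_char expression out) := by unfold Spec_detect_special_char; infer_instance

-- ===== CLAIM (what is proved, stated in full; the proofs are below) =====
def Claim_equal_detect_special_char : Prop := ∀ (expression : String), Dom_detect_special_char expression → Spec_detect_special_char expression (detect_special_char expression)

-- ===== LEMMAS AND PROOFS =====

-- membership in B's guarded set-building fold
theorem mem_foldl_add_if {α β : Type} [BEq α] [LawfulBEq α]
    (l : List β) (p : β → Bool) (f : β → α) (s0 : PySem.Set α) (y : α) :
    y ∈ l.foldl (fun s b => if p b then PySem.Set.add s (f b) else s) s0 ↔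
      y ∈ s0 ∨ ∃ b ∈ l, p b = true ∧ y = f b := by
  induction l generalizing s0 with
  | nil => simp
  | cons hd tl ih =>
    rw [List.foldl_cons]
    by_cases h : p hd = true <;>
      simp [h, ih, PySem.Set.mem_add, or_and_right, exists_or, or_assoc]

-- nodup of B's guarded set-building fold
theorem nodup_foldl_add_if {α β : Type} [BEq α] [LawfulBEq α]
    (l : List β) (p : β → Bool) (f : β → α) (s0 : PySem.Set α) (h0 : s0.Nodup) :
    (l.foldl (fun s b => if p b then PySem.Set.add s (f b) else s) s0).Nodup := by
  induction l generalizing s0 with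
  | nil => exact h0
  | cons hd tl ih =>
    rw [List.foldl_cons]
    by_cases h : p hd = true
    · simp only [h, if_true]
      exact ih _ (PySem.Set.nodup_add _ _ h0)
    · simp only [h]
      exact ih _ h0

-- a 1-char string is "in" a string iff its character occurs in it
theorem isIn_singleton_iff (ch : Char) (e : String) :
    PySem.Str.isIn (String.ofList [ch]) e = true ↔ ch ∈ e.toList := by
  rw [PySem.Str.isIn_iff_infix]
  simp only [String.toList_ofList]
  constructor
  · intro h
    exact (List.singleton_sublist).1 h.sublist
  · intro h
    obtain ⟨l, r, hlr⟩ := List.append_of_mem h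
    exact ⟨l, r, by simp [hlr]⟩

-- A's filter result has the same members as B's seen set
theorem mem_filter_iff_mem_seen (e : String) (c : String) :
    (c ∈ nscA.filter (fun x => PySem.Str.isIn x e) ↔
      c ∈ e.toList.foldl
        (fun s ch =>
          if rankB.contains (String.ofList [ch]) then PySem.Set.add s (String.ofList [ch]) else s)
        PySem.Set.empty) := by
  rw [mem_foldl_add_if, List.mem_filter]
  constructor
  · rintro ⟨hmem, hin⟩
    have h1 : c.toList.length = 1 ∧ rankB.contains c = true := by
      fin_cases hmem <;> exact ⟨by decide, by decide⟩
    obtain ⟨ch, hc⟩ := List.length_eq_one_iff.1 h1.1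
    have hceq : c = String.ofList [ch] := by rw [← hc, String.ofList_toList]
    refine Or.inr ⟨ch, ?_, ?_, hceq⟩
    · exact (isIn_singleton_iff ch e).1 (hceq ▸ hin)
    · exact hceq ▸ h1.2
  · rintro (h | ⟨ch, hch, hcont, hceq⟩)
    · simp [PySem.Set.empty] at h
    · subst hceq
      refine ⟨?_, (isIn_singleton_iff ch e).2 hch⟩
      have : String.ofList [ch] ∈ rankB.keys :=
        (PySem.Dict.contains_iff_mem_keys _ _).1 hcont
      have hk : rankB.keys = nscA := by decide
      exact hk ▸ this

-- ===== VERDICT (by name: the statement is the Claim_ definition above) =====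
theorem detect_special_char_spec : Claim_equal_detect_special_char := by
  intro e _
  unfold Spec_detect_special_char detect_special_char detect_special_char_alt
  rw [PySem.List.foldl_append_if_eq_filter]
  simp only [List.nil_append]
  set seen := e.toList.foldl
      (fun s ch =>
        if rankB.contains (String.ofList [ch]) then PySem.Set.add s (String.ofList [ch]) else s)
      PySem.Set.empty with hseen
  have hperm : (nscA.filter (fun x => PySem.Str.isIn x e)).Perm seen := by
    rw [List.perm_ext_iff_of_nodup
      (List.Nodup.filter _ (by decide))
      (nodup_foldl_add_if _ _ _ _ (by decide))]
    exact fun c => mem_filter_iff_mem_seen e c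
  have hpw : (nscA.filter (fun x => PySem.Str.isIn x e)).Pairwise
      (fun a b => rankB.getD a 0 < rankB.getD b 0) := by
    have : nscA.Pairwise (fun a b => rankB.getD a 0 < rankB.getD b 0) := by decide
    exact this.filter _
  exact (PySem.List.sorted_eq_of_perm_of_pairwise_lt _ _ _ hperm hpw).symm
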